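-- pv_equiv track=rewrite | github.com/wojmichaluk/WDI-2022-2023 | powtórka do kolosów/kolos_15-sam.py | cut_from_tabs
-- ===== SOURCE A (Python) =====
-- def cut_from_tabs(t1,t2):
--     n=len(t1)
--     for l1 in range(1,24):
--         l2=24-l1
--         for j in range(n-l1+1):
--             for k in range(n-l2+1):
--                 if czy_jest_potega(suma(t1[j:j+l1])+suma(t2[k:k+l2])):
--                     return True
--     return False
--
-- def suma(T):
--     suma=0
--     for elem in T:
--         suma+=elem
--     return suma
--
-- def czy_jest_potega(n):
--     if n==1:
--         return True
--     i=2
--     while i*i<=n: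
--         kopia_n=n
--         if kopia_n%(i*i)==0:
--             kopia_n//=(i*i)
--             while kopia_n%i==0:
--                 kopia_n//=i
--             if kopia_n==1:
--                 return True
--         i+=1
--     return False
-- ===== SOURCE B (Python) =====
-- def cut_from_tabs(t1, t2):
--     n = len(t1)
--     for l1 in range(1, 24):
--         l2 = 24 - l1
--         sums1 = [sum(t1[j:j + l1]) for j in range(n - l1 + 1)]
--         sums2 = {sum(t2[k:k + l2]) for k in range(n - l2 + 1)}
--         if not sums1 or not sums2:
--             continue
--         if any(1 - a in sums2 for a in sums1):
--             return True
--         hi = max(sums1) + max(sums2)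
--         i = 2
--         while i * i <= hi:
--             p = i * i
--             while p <= hi:
--                 if any(p - a in sums2 for a in sums1):
--                     return True
--                 p *= i
--             i += 1
--     return False
-- ===== Notes on version B (the rewrite author's own statement) =====
-- stated objective: faster
-- what changed: For each of the 23 window-length splits B collects the window sums of each list once (a list for t1, a hash set for t2) and then enumerates the perfect powers up to the maximal reachable total, testing each complement against the set, instead of A's scan over every (t1-window, t2-window) pair with a per-pair trial-division perfect-power test.
import Mathlib
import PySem

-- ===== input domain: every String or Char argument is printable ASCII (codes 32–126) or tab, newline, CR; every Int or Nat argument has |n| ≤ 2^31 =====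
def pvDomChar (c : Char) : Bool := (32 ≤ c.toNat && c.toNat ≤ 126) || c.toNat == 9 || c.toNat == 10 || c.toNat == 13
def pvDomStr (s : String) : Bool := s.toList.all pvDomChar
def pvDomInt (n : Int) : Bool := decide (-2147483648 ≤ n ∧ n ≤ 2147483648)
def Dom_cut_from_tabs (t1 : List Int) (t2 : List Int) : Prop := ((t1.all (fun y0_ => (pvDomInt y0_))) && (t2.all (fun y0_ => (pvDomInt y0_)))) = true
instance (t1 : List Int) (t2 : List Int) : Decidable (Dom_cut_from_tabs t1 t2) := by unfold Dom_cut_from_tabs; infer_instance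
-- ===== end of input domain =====

-- B replaces A's scan over all (t1-window, t2-window) pairs by collecting the window sums of
-- each list once and enumerating the perfect powers up to the maximal reachable total, testing
-- each complement against a hash set of t2's window sums (objective: faster).

-- ===== PORT A =====

-- suma(T): running-total loop
def suma (T : List Int) : Int := T.foldl (fun s e => s + e) 0

-- inner 'while kopia_n % i == 0: kopia_n //= i' of czy_jest_potega.
-- The extra conjuncts '2 ≤ i ∧ 0 < k' only make the recursion terminating; they hold at
-- every call the program makes (i starts at 2, k = n // (i*i) ≥ 1 there).
def stripA (i k : Int) : Int :=
  if h : 2 ≤ i ∧ 0 < k ∧ PySem.Int.mod k i = 0 then stripA i (PySem.Int.floordiv k i) else k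
termination_by k.toNat
decreasing_by
  have hi : (0:Int) < i := by omega
  rw [PySem.Int.floordiv_eq_ediv_of_pos hi]
  have h1 : k / i < k := by
    apply Int.ediv_lt_of_lt_mul (by omega)
    nlinarith
  omega

-- outer 'while i*i <= n' loop of czy_jest_potega
def potegaLoopA (n i : Int) : Bool :=
  if h : i * i ≤ n then
    if PySem.Int.mod n (i * i) = 0 ∧ stripA i (PySem.Int.floordiv n (i * i)) = 1 then true
    else potegaLoopA n (i + 1)
  else false
termination_by (n + 1 - i).toNat
decreasing_by
  have hin : i ≤ n := by nlinarith [sq_nonneg i, sq_nonneg (i - 1)]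
  omega

def czy_jest_potega (n : Int) : Bool :=
  if n = 1 then true else potegaLoopA n 2

def cut_from_tabs (t1 : List Int) (t2 : List Int) : Bool :=
  let n : Int := PySem.List.len t1
  (PySem.List.pyRange 1 24 1).any fun l1 =>
    let l2 := 24 - l1
    (PySem.List.pyRange 0 (n - l1 + 1) 1).any fun j =>
      (PySem.List.pyRange 0 (n - l2 + 1) 1).any fun k =>
        czy_jest_potega (suma (PySem.List.slice t1 (some j) (some (j + l1))) +
                         suma (PySem.List.slice t2 (some k) (some (k + l2))))

-- ===== PORT B =====

-- inner 'while p <= hi: if any(...): return True; p *= i' of the perfect-power enumeration.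
-- The extra conjuncts '2 ≤ i ∧ 2 ≤ p' only make the recursion terminating; they hold at
-- every call the program makes (p starts at i*i with i ≥ 2 and only grows).
def powersInnerB (hi i p : Int) (sums1 : List Int) (sums2 : PySem.Set Int) : Bool :=
  if h : 2 ≤ i ∧ 2 ≤ p ∧ p ≤ hi then
    (sums1.any fun a => PySem.Set.contains sums2 (p - a)) || powersInnerB hi i (p * i) sums1 sums2
  else false
termination_by (hi + 1 - p).toNat
decreasing_by
  have : p + 2 ≤ p * i := by nlinarith
  omega

-- outer 'while i*i <= hi' loop; the extra conjunct '2 ≤ i' is for termination only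
-- (i starts at 2 and only grows).
def powersOuterB (hi i : Int) (sums1 : List Int) (sums2 : PySem.Set Int) : Bool :=
  if h : 2 ≤ i ∧ i * i ≤ hi then
    powersInnerB hi i (i * i) sums1 sums2 || powersOuterB hi (i + 1) sums1 sums2
  else false
termination_by (hi + 1 - i).toNat
decreasing_by
  have : i ≤ i * i := by nlinarith
  omega

def cut_from_tabs_alt (t1 : List Int) (t2 : List Int) : Bool :=
  let n : Int := PySem.List.len t1
  (PySem.List.pyRange 1 24 1).any fun l1 =>
    let l2 := 24 - l1
    let sums1 := (PySem.List.pyRange 0 (n - l1 + 1) 1).map fun j =>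
      (PySem.List.slice t1 (some j) (some (j + l1))).sum
    let sums2 : PySem.Set Int := PySem.Set.ofList ((PySem.List.pyRange 0 (n - l2 + 1) 1).map fun k =>
      (PySem.List.slice t2 (some k) (some (k + l2))).sum)
    if sums1 = [] ∨ sums2 = ([] : List Int) then false
    else
      -- max(sums1)/max(sums2): nonempty here, so max? is some; max over a set is order-independent
      (sums1.any fun a => PySem.Set.contains sums2 (1 - a)) ||
        powersOuterB ((PySem.List.max? sums1 (fun x => x)).getD 0 +
                      (PySem.List.max? sums2 (fun x => x)).getD 0) 2 sums1 sums2

-- ===== PRECONDITION & SPEC =====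
def Spec_cut_from_tabs (t1 : List Int) (t2 : List Int) (out : Bool) : Prop := out = cut_from_tabs_alt t1 t2
instance (t1 : List Int) (t2 : List Int) (out : Bool) : Decidable (Spec_cut_from_tabs t1 t2 out) := by unfold Spec_cut_from_tabs; infer_instance

-- ===== CLAIM (what is proved, stated in full; the proofs are below) =====
def Claim_equal_cut_from_tabs : Prop := ∀ (t1 : List Int) (t2 : List Int), Dom_cut_from_tabs t1 t2 → Spec_cut_from_tabs t1 t2 (cut_from_tabs t1 t2)

-- ===== LEMMAS AND PROOFS =====

lemma stripA_eq_one_iff (i : Int) (hi : 2 ≤ i) :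
    ∀ (k : Int), 1 ≤ k → (stripA i k = 1 ↔ ∃ e : Nat, k = i ^ e) := by
  suffices H : ∀ (N : Nat) (k : Int), k.toNat ≤ N → 1 ≤ k → (stripA i k = 1 ↔ ∃ e : Nat, k = i ^ e) by
    intro k hk; exact H k.toNat k le_rfl hk
  intro N
  induction N with
  | zero => intro k h1 h2; omega
  | succ N ih =>
    intro k hN hk
    rw [stripA]
    by_cases hd : PySem.Int.mod k i = 0
    · have hguard : 2 ≤ i ∧ 0 < k ∧ PySem.Int.mod k i = 0 := ⟨hi, by omega, hd⟩
      rw [dif_pos hguard]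
      have hpos : (0:Int) < i := by omega
      rw [PySem.Int.floordiv_eq_ediv_of_pos hpos]
      obtain ⟨q, hq⟩ := (PySem.Int.mod_eq_zero_iff_dvd k i).mp hd
      have hq1 : 1 ≤ q := by nlinarith
      have hdiv : k / i = q := by rw [hq]; exact Int.mul_ediv_cancel_left q (by omega)
      rw [hdiv]
      have hlt : 2 * q ≤ k := by nlinarith
      rw [ih q (by omega) hq1]
      constructor
      · rintro ⟨e, he⟩; exact ⟨e + 1, by rw [hq, he, pow_succ]; ring⟩
      · rintro ⟨e, he⟩
        cases e with
        | zero => simp at he; omega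
        | succ e' =>
          refine ⟨e', ?_⟩
          have : i * q = i * i ^ e' := by rw [← hq, he, pow_succ]; ring
          exact mul_left_cancel₀ (by omega) this
    · rw [dif_neg (by tauto)]
      constructor
      · intro h1; exact ⟨0, by simpa using h1⟩
      · rintro ⟨e, he⟩
        cases e with
        | zero => simpa using he
        | succ e' =>
          exfalso; apply hd
          rw [PySem.Int.mod_eq_zero_iff_dvd]
          exact ⟨i ^ e', by rw [he, pow_succ]; ring⟩

lemma potegaLoopA_eq_true_iff (n : Int) :
    ∀ (i0 : Int), 2 ≤ i0 →
    (potegaLoopA n i0 = true ↔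
      ∃ i : Int, i0 ≤ i ∧ i * i ≤ n ∧ PySem.Int.mod n (i * i) = 0 ∧
        stripA i (PySem.Int.floordiv n (i * i)) = 1) := by
  suffices H : ∀ (N : Nat) (i0 : Int), (n + 1 - i0).toNat ≤ N → 2 ≤ i0 →
      (potegaLoopA n i0 = true ↔ ∃ i : Int, i0 ≤ i ∧ i * i ≤ n ∧ PySem.Int.mod n (i * i) = 0 ∧
        stripA i (PySem.Int.floordiv n (i * i)) = 1) by
    intro i0 h0; exact H _ i0 le_rfl h0
  intro N
  induction N with
  | zero =>
    intro i0 hN h0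
    have hni : n < i0 := by omega
    have hng : ¬ (i0 * i0 ≤ n) := by nlinarith
    rw [potegaLoopA, dif_neg hng]
    simp only [Bool.false_eq_true, false_iff]
    rintro ⟨i, hi0, hii, -⟩
    nlinarith
  | succ N ih =>
    intro i0 hN h0
    rw [potegaLoopA]
    by_cases hg : i0 * i0 ≤ n
    · rw [dif_pos hg]
      by_cases hc : PySem.Int.mod n (i0 * i0) = 0 ∧ stripA i0 (PySem.Int.floordiv n (i0 * i0)) = 1
      · rw [if_pos hc]
        simp only [true_iff]
        exact ⟨i0, le_rfl, hg, hc.1, hc.2⟩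
      · rw [if_neg hc]
        have hi0n : i0 ≤ n := by nlinarith
        rw [ih (i0 + 1) (by omega) (by omega)]
        constructor
        · rintro ⟨i, hi1, rest⟩; exact ⟨i, by omega, rest⟩
        · rintro ⟨i, hi1, hii, hm, hs⟩
          rcases eq_or_lt_of_le hi1 with rfl | hlt
          · exact absurd ⟨hm, hs⟩ hc
          · exact ⟨i, by omega, hii, hm, hs⟩
    · rw [dif_neg hg]
      simp only [Bool.false_eq_true, false_iff]
      rintro ⟨i, hi0, hii, -⟩
      nlinarith

def IsPow (t : Int) : Prop := ∃ (i : Int) (e : Nat), 2 ≤ i ∧ 2 ≤ e ∧ t = i ^ e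

lemma czy_jest_potega_iff (t : Int) : czy_jest_potega t = true ↔ t = 1 ∨ IsPow t := by
  unfold czy_jest_potega
  by_cases h1 : t = 1
  · simp [h1]
  · rw [if_neg h1]
    rw [potegaLoopA_eq_true_iff t 2 le_rfl]
    constructor
    · rintro ⟨i, hi2, hii, hm, hs⟩
      right
      have hiipos : (0:Int) < i * i := by nlinarith
      rw [PySem.Int.floordiv_eq_ediv_of_pos hiipos] at hs
      obtain ⟨q, hq⟩ := (PySem.Int.mod_eq_zero_iff_dvd t (i * i)).mp hm
      have hdiv : t / (i * i) = q := by rw [hq]; exact Int.mul_ediv_cancel_left q (by omega)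
      rw [hdiv] at hs
      have hq1 : 1 ≤ q := by nlinarith
      obtain ⟨e, he⟩ := (stripA_eq_one_iff i hi2 q hq1).mp hs
      refine ⟨i, e + 2, hi2, by omega, ?_⟩
      rw [hq, he, pow_add]; ring
    · rintro (h | ⟨i, e, hi2, he2, ht⟩)
      · exact absurd h h1
      · have hpow1 : (1:Int) ≤ i ^ (e - 2) := one_le_pow₀ (by omega)
        have hsplit : t = i * i * i ^ (e - 2) := by
          have hee : i ^ e = i ^ (2 + (e - 2)) := by congr 1; omega
          rw [ht, hee, pow_add, pow_two]
        refine ⟨i, hi2, ?_, ?_, ?_⟩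
        · nlinarith
        · rw [PySem.Int.mod_eq_zero_iff_dvd]; exact ⟨i ^ (e - 2), hsplit⟩
        · have hiipos : (0:Int) < i * i := by nlinarith
          rw [PySem.Int.floordiv_eq_ediv_of_pos hiipos, hsplit,
            Int.mul_ediv_cancel_left _ (by omega : i * i ≠ 0)]
          rw [stripA_eq_one_iff i hi2 _ hpow1]
          exact ⟨e - 2, rfl⟩

-- no power of i times p fits under hi once p itself exceeds hi
lemma no_pow_fits {hi i p : Int} (hi2 : 2 ≤ i) (hp : 2 ≤ p) (hph : hi < p) (e : Nat) :
    ¬ p * i ^ e ≤ hi := by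
  intro hle
  have h1 : (1:Int) ≤ i ^ e := one_le_pow₀ (by omega)
  nlinarith

-- characterization of the inner enumeration loop
lemma powersInnerB_iff (hi i : Int) (sums1 : List Int) (sums2 : PySem.Set Int) (hi2 : 2 ≤ i) :
    ∀ p : Int, 2 ≤ p →
      (powersInnerB hi i p sums1 sums2 = true ↔
        ∃ e : Nat, p * i ^ e ≤ hi ∧
          (sums1.any fun a => PySem.Set.contains sums2 (p * i ^ e - a)) = true) := by
  suffices H : ∀ (N : Nat) (p : Int), (hi + 1 - p).toNat ≤ N → 2 ≤ p →
      (powersInnerB hi i p sums1 sums2 = true ↔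
        ∃ e : Nat, p * i ^ e ≤ hi ∧
          (sums1.any fun a => PySem.Set.contains sums2 (p * i ^ e - a)) = true) by
    intro p hp; exact H _ p le_rfl hp
  intro N
  induction N with
  | zero =>
    intro p hN hp
    rw [powersInnerB, dif_neg (by omega)]
    simp only [Bool.false_eq_true, false_iff]
    rintro ⟨e, hle, -⟩
    exact no_pow_fits hi2 hp (by omega) e hle
  | succ N ih =>
    intro p hN hp
    rw [powersInnerB]
    by_cases hg : p ≤ hi
    · rw [dif_pos ⟨hi2, hp, hg⟩, Bool.or_eq_true]
      have hpi : p + 2 ≤ p * i := by nlinarith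
      rw [ih (p * i) (by omega) (by omega)]
      constructor
      · rintro (hhit | ⟨e, hle, hhit⟩)
        · exact ⟨0, by simpa using hg, by simpa using hhit⟩
        · refine ⟨e + 1, ?_, ?_⟩
          · rw [pow_succ]; ring_nf; ring_nf at hle; exact hle
          · have : p * i * i ^ e = p * i ^ (e + 1) := by rw [pow_succ]; ring
            rw [this] at hhit; exact hhit
      · rintro ⟨e, hle, hhit⟩
        cases e with
        | zero => left; simpa using hhit
        | succ e' =>
          right
          have hre : p * i ^ (e' + 1) = p * i * i ^ e' := by rw [pow_succ]; ring
          exact ⟨e', by rw [← hre]; exact hle, by rw [hre] at hhit; exact hhit⟩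
    · rw [dif_neg (by omega)]
      simp only [Bool.false_eq_true, false_iff]
      rintro ⟨e, hle, -⟩
      exact no_pow_fits hi2 hp (by omega) e hle

lemma no_big_base {hi i0 : Int} (h0 : 2 ≤ i0) (hg : ¬ i0 * i0 ≤ hi) :
    ¬ ∃ (i : Int) (e : Nat), i0 ≤ i ∧ 2 ≤ e ∧ i ^ e ≤ hi := by
  rintro ⟨i, e, hi0, he2, hle⟩
  have h2i : 2 ≤ i := by omega
  have hmono : i0 * i0 ≤ i * i := by nlinarith
  have hpe : i * i ≤ i ^ e := by
    have h2 : i ^ 2 ≤ i ^ e := pow_le_pow_right₀ (by omega) he2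
    rw [pow_two] at h2; exact h2
  omega

-- characterization of the outer enumeration loop: some perfect power i^e ≤ hi scores a hit
lemma powersOuterB_iff (hi : Int) (sums1 : List Int) (sums2 : PySem.Set Int) :
    ∀ i0 : Int, 2 ≤ i0 →
      (powersOuterB hi i0 sums1 sums2 = true ↔
        ∃ (i : Int) (e : Nat), i0 ≤ i ∧ 2 ≤ e ∧ i ^ e ≤ hi ∧
          (sums1.any fun a => PySem.Set.contains sums2 (i ^ e - a)) = true) := by
  suffices H : ∀ (N : Nat) (i0 : Int), (hi + 1 - i0).toNat ≤ N → 2 ≤ i0 →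
      (powersOuterB hi i0 sums1 sums2 = true ↔
        ∃ (i : Int) (e : Nat), i0 ≤ i ∧ 2 ≤ e ∧ i ^ e ≤ hi ∧
          (sums1.any fun a => PySem.Set.contains sums2 (i ^ e - a)) = true) by
    intro i0 h0; exact H _ i0 le_rfl h0
  intro N
  induction N with
  | zero =>
    intro i0 hN h0
    have hg : ¬ (i0 * i0 ≤ hi) := by nlinarith [show hi < i0 by omega]
    rw [powersOuterB, dif_neg (by tauto)]
    simp only [Bool.false_eq_true, false_iff]
    rintro ⟨i, e, hi0, he2, hle, -⟩
    exact no_big_base h0 hg ⟨i, e, hi0, he2, hle⟩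
  | succ N ih =>
    intro i0 hN h0
    rw [powersOuterB]
    by_cases hg : i0 * i0 ≤ hi
    · rw [dif_pos ⟨h0, hg⟩, Bool.or_eq_true]
      have hi0hi : i0 ≤ hi := by nlinarith
      rw [ih (i0 + 1) (by omega) (by omega)]
      rw [powersInnerB_iff hi i0 sums1 sums2 h0 (i0 * i0) (by nlinarith)]
      constructor
      · rintro (⟨e, hle, hhit⟩ | ⟨i, e, hi1, he2, hle, hhit⟩)
        · refine ⟨i0, e + 2, le_rfl, by omega, ?_, ?_⟩
          · rw [pow_add, pow_two]; ring_nf; ring_nf at hle; exact hle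
          · have : i0 ^ (e + 2) = i0 * i0 * i0 ^ e := by rw [pow_add, pow_two]; ring
            rw [this]; exact hhit
        · exact ⟨i, e, by omega, he2, hle, hhit⟩
      · rintro ⟨i, e, hi1, he2, hle, hhit⟩
        rcases eq_or_lt_of_le hi1 with heq | hlt
        · subst heq
          left
          refine ⟨e - 2, ?_, ?_⟩
          · have hee : i0 ^ e = i0 ^ (2 + (e - 2)) := by congr 1; omega
            rw [hee, pow_add, pow_two] at hle
            ring_nf; ring_nf at hle; exact hle
          · have hee : i0 * i0 * i0 ^ (e - 2) = i0 ^ e := by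
              have h2 : i0 ^ e = i0 ^ (2 + (e - 2)) := by congr 1; omega
              rw [h2, pow_add, pow_two]
            rw [hee]; exact hhit
        · right; exact ⟨i, e, by omega, he2, hle, hhit⟩
    · rw [dif_neg (by tauto)]
      simp only [Bool.false_eq_true, false_iff]
      rintro ⟨i, e, hi0, he2, hle, -⟩
      exact no_big_base h0 hg ⟨i, e, hi0, he2, hle⟩

lemma suma_eq_sum (T : List Int) : suma T = T.sum := Eq.symm List.sum_eq_foldl

-- per-split equivalence: A's pair scan vs B's power-enumeration + complement lookup
lemma body_iff (t1 t2 : List Int) (l1 : Int) (hl1 : 1 ≤ l1) (hl24 : l1 < 24) :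
    ((PySem.List.pyRange 0 ((PySem.List.len t1 : Int) - l1 + 1) 1).any fun j =>
        (PySem.List.pyRange 0 ((PySem.List.len t1 : Int) - (24 - l1) + 1) 1).any fun k =>
          czy_jest_potega
            (suma (PySem.List.slice t1 (some j) (some (j + l1))) +
              suma (PySem.List.slice t2 (some k) (some (k + (24 - l1)))))) =
      (let sums1 := (PySem.List.pyRange 0 ((PySem.List.len t1 : Int) - l1 + 1) 1).map fun j =>
          (PySem.List.slice t1 (some j) (some (j + l1))).sum
       let sums2 : PySem.Set Int := PySem.Set.ofList ((PySem.List.pyRange 0 ((PySem.List.len t1 : Int) - (24 - l1) + 1) 1).map fun k =>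
          (PySem.List.slice t2 (some k) (some (k + (24 - l1)))).sum)
       if sums1 = [] ∨ sums2 = ([] : List Int) then false
       else
        (sums1.any fun a => PySem.Set.contains sums2 (1 - a)) ||
          powersOuterB ((PySem.List.max? sums1 (fun x => x)).getD 0 +
                        (PySem.List.max? sums2 (fun x => x)).getD 0) 2 sums1 sums2) := by
  set n : Int := (PySem.List.len t1 : Int) with hn
  set S1 : List Int := (PySem.List.pyRange 0 (n - l1 + 1) 1).map (fun j =>
    (PySem.List.slice t1 (some j) (some (j + l1))).sum) with hS1def
  set S2 : PySem.Set Int := PySem.Set.ofList ((PySem.List.pyRange 0 (n - (24 - l1) + 1) 1).map (fun k =>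
    (PySem.List.slice t2 (some k) (some (k + (24 - l1)))).sum)) with hS2def
  have hmemS1 : ∀ a : Int, a ∈ S1 ↔ ∃ j : Int, (0 ≤ j ∧ j < n - l1 + 1) ∧
      a = (PySem.List.slice t1 (some j) (some (j + l1))).sum := by
    intro a
    rw [hS1def, List.mem_map]
    constructor
    · rintro ⟨j, hj, rfl⟩; exact ⟨j, PySem.List.mem_pyRange_one.mp hj, rfl⟩
    · rintro ⟨j, hj, rfl⟩; exact ⟨j, PySem.List.mem_pyRange_one.mpr hj, rfl⟩
  have hmemS2 : ∀ b : Int, b ∈ S2 ↔ ∃ k : Int, (0 ≤ k ∧ k < n - (24 - l1) + 1) ∧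
      b = (PySem.List.slice t2 (some k) (some (k + (24 - l1)))).sum := by
    intro b
    rw [hS2def, PySem.Set.mem_ofList, List.mem_map]
    constructor
    · rintro ⟨k, hk, rfl⟩; exact ⟨k, PySem.List.mem_pyRange_one.mp hk, rfl⟩
    · rintro ⟨k, hk, rfl⟩; exact ⟨k, PySem.List.mem_pyRange_one.mpr hk, rfl⟩
  by_cases hc : S1 = [] ∨ S2 = ([] : List Int)
  · simp only [if_pos hc]
    rcases hc with h | h
    · have : PySem.List.pyRange 0 (n - l1 + 1) 1 = [] := by
        rcases List.map_eq_nil_iff.mp (hS1def ▸ h) with h'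
        exact h'
      rw [this]; simp
    · have hr2 : (PySem.List.pyRange 0 (n - (24 - l1) + 1) 1).map (fun k =>
          (PySem.List.slice t2 (some k) (some (k + (24 - l1)))).sum) = [] := by
        by_contra hne
        obtain ⟨b, hb⟩ := List.exists_mem_of_ne_nil _ hne
        have : b ∈ S2 := by rw [hS2def, PySem.Set.mem_ofList]; exact hb
        rw [h] at this; simp at this
      have : PySem.List.pyRange 0 (n - (24 - l1) + 1) 1 = [] := List.map_eq_nil_iff.mp hr2
      rw [this]; simp
  · simp only [if_neg hc]
    obtain ⟨hS1ne, hS2ne⟩ := not_or.mp hc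
    obtain ⟨mx1, hmx1⟩ : ∃ mx1, PySem.List.max? S1 (fun x => x) = some mx1 := by
      cases h : PySem.List.max? S1 (fun x => x) with
      | none => exact absurd ((PySem.List.max?_eq_none_iff _ _).mp h) hS1ne
      | some v => exact ⟨v, rfl⟩
    obtain ⟨mx2, hmx2⟩ : ∃ mx2, PySem.List.max? S2 (fun x => x) = some mx2 := by
      cases h : PySem.List.max? S2 (fun x => x) with
      | none => exact absurd ((PySem.List.max?_eq_none_iff _ _).mp h) hS2ne
      | some v => exact ⟨v, rfl⟩
    rw [hmx1, hmx2]
    simp only [Option.getD_some]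
    have hub1 : ∀ a ∈ S1, a ≤ mx1 := PySem.List.max?_id_le hmx1
    have hub2 : ∀ b ∈ S2, b ≤ mx2 := PySem.List.max?_id_le hmx2
    rw [Bool.eq_iff_iff, Bool.or_eq_true, powersOuterB_iff (mx1 + mx2) S1 S2 2 le_rfl]
    simp only [List.any_eq_true]
    constructor
    · rintro ⟨j, hjmem, k, hkmem, hP⟩
      rw [PySem.List.mem_pyRange_one] at hjmem hkmem
      rw [suma_eq_sum, suma_eq_sum] at hP
      set a := (PySem.List.slice t1 (some j) (some (j + l1))).sum with hadef
      set b := (PySem.List.slice t2 (some k) (some (k + (24 - l1)))).sum with hbdef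
      have haS1 : a ∈ S1 := (hmemS1 a).mpr ⟨j, hjmem, rfl⟩
      have hbS2 : b ∈ S2 := (hmemS2 b).mpr ⟨k, hkmem, rfl⟩
      rcases (czy_jest_potega_iff (a + b)).mp hP with h1 | ⟨i, e, hi2, he2, heq⟩
      · left
        refine ⟨a, haS1, ?_⟩
        rw [PySem.Set.contains_iff, show 1 - a = b by omega]
        exact hbS2
      · right
        refine ⟨i, e, hi2, he2, ?_, a, haS1, ?_⟩
        · have := hub1 a haS1; have := hub2 b hbS2; omega
        · rw [PySem.Set.contains_iff, show i ^ e - a = b by omega]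
          exact hbS2
    · rintro (⟨a, haS1, hcont⟩ | ⟨i, e, hi2, he2, hle, a, haS1, hcont⟩)
      · rw [PySem.Set.contains_iff] at hcont
        obtain ⟨j, hj, hadef⟩ := (hmemS1 a).mp haS1
        obtain ⟨k, hk, hbdef⟩ := (hmemS2 (1 - a)).mp hcont
        refine ⟨j, PySem.List.mem_pyRange_one.mpr hj, k, PySem.List.mem_pyRange_one.mpr hk, ?_⟩
        rw [suma_eq_sum, suma_eq_sum, ← hadef, ← hbdef,
          show a + (1 - a) = 1 by ring, czy_jest_potega_iff]
        exact Or.inl rfl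
      · rw [PySem.Set.contains_iff] at hcont
        obtain ⟨j, hj, hadef⟩ := (hmemS1 a).mp haS1
        obtain ⟨k, hk, hbdef⟩ := (hmemS2 (i ^ e - a)).mp hcont
        refine ⟨j, PySem.List.mem_pyRange_one.mpr hj, k, PySem.List.mem_pyRange_one.mpr hk, ?_⟩
        rw [suma_eq_sum, suma_eq_sum, ← hadef, ← hbdef,
          show a + (i ^ e - a) = i ^ e by ring, czy_jest_potega_iff]
        exact Or.inr ⟨i, e, hi2, he2, rfl⟩

-- ===== VERDICT (by name: the statement is the Claim_ definition above) =====
theorem cut_from_tabs_spec : Claim_equal_cut_from_tabs := by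
  intro t1 t2 _hdom
  unfold Spec_cut_from_tabs
  unfold cut_from_tabs cut_from_tabs_alt
  rw [Bool.eq_iff_iff, List.any_eq_true, List.any_eq_true]
  constructor
  · rintro ⟨l1, hmem, hbody⟩
    have hl := PySem.List.mem_pyRange_one.mp hmem
    refine ⟨l1, hmem, ?_⟩
    rw [← body_iff t1 t2 l1 hl.1 hl.2]
    exact hbody
  · rintro ⟨l1, hmem, hbody⟩
    have hl := PySem.List.mem_pyRange_one.mp hmem
    refine ⟨l1, hmem, ?_⟩
    rw [body_iff t1 t2 l1 hl.1 hl.2]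
    exact hbody
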